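-- pv_equiv track=rewrite | github.com/AlienFoun/Marcus | helper.py | found_duplication
-- ===== SOURCE A (Python) =====
-- def found_duplication(data_dict: dict, weight_dict: dict, words_list: list) -> list:
--     dict_keys = list(weight_dict.keys())  # Получаем названия всех ошибок
--     for element in dict_keys:
--         tag_words = data_dict.get(element)  # Получаем словарь слов для определенной ошибки из базы
--
--         words = list(tag_words.keys())  # Получаем слова
--
--         for word in words_list:  # Цикл для проверки наличия входных данных в значениях из базы
--             if word in words:  # Проверяем наличие
--                 new_weight = {element: weight_dict[element] + tag_words[word]}  # Создаем переменную для обновления веса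
--                 weight_dict.update(new_weight)  # Обновляем
--
--     return_list = list(weight_dict.items())  # метод .items возвращает все пары (ключ, значение) <- Кортеж
--     # .items возвращает значения в виде динамической структуры,
--     # переводим в список, чтобы удобнее было работать
--     return return_list
-- ===== SOURCE B (Python) =====
-- def found_duplication(data_dict: dict, weight_dict: dict, words_list: list) -> list:
--     # Stage 1: frequency table of the input words (distinct words, first-occurrence order).
--     counts = {w: words_list.count(w) for w in dict.fromkeys(words_list)}
--     # Stage 2: build the result list directly, one pair per error key.
--     return_list = []
--     for element, weight in weight_dict.items():
--         tag_words = data_dict.get(element)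
--         bonus = 0
--         for w, c in counts.items():
--             if w in tag_words:
--                 bonus += c * tag_words[w]
--         return_list.append((element, weight + bonus))
--     weight_dict.update(return_list)  # keep A's in-place update of weight_dict
--     return return_list
-- ===== Notes on version B (the rewrite author's own statement) =====
-- stated objective: alternative
-- what changed: B is two staged passes instead of A's in-place nested update loop: it first builds a word-frequency table over words_list, then produces each output pair directly as (key, weight + sum of count*tag_weight over the distinct matched words) without threading a mutating dict state through the word loop, writing the result back to weight_dict once at the end.
import Mathlib
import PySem

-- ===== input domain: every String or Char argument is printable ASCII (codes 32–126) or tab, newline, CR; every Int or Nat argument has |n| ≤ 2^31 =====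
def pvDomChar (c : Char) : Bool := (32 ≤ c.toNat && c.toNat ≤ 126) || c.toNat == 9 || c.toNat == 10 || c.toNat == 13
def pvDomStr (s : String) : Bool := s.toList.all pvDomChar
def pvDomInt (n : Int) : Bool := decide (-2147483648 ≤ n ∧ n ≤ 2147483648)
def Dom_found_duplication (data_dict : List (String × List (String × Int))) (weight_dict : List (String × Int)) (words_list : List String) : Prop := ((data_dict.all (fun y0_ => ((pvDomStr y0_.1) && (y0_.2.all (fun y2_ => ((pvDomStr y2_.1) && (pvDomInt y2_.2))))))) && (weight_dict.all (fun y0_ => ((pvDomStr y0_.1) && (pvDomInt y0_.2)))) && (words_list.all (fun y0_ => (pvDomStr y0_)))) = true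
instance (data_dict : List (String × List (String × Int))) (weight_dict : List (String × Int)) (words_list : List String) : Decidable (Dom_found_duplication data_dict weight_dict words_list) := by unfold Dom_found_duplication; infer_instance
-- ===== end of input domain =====

-- B replaces A's in-place nested update loop by two staged passes (a frequency table of the input
-- words, then a direct construction of each output pair); same return value, same final mutation
-- of weight_dict (the theorems are about the returned list).

-- ===== PORT A =====
def found_duplication (data_dict : List (String × List (String × Int))) (weight_dict : List (String × Int)) (words_list : List String) : List (String × Int) :=
  let dd : PySem.Dict String (PySem.Dict String Int) :=
    PySem.Dict.ofList (data_dict.map (fun p => (p.1, PySem.Dict.ofList p.2)))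
  let wd0 : PySem.Dict String Int := PySem.Dict.ofList weight_dict
  let dict_keys := PySem.Dict.keys wd0
  let wd := dict_keys.foldl (fun wd element =>
    match PySem.Dict.get? dd element with
    | none => wd   -- Python raises AttributeError (None.keys()) here; excluded by Pre_
    | some tag_words =>
      let words := PySem.Dict.keys tag_words
      words_list.foldl (fun wd word =>
        if words.contains word then
          -- weight_dict[element]: element is always a present key, so getD is exact here
          PySem.Dict.insert wd element (PySem.Dict.getD wd element 0 + PySem.Dict.getD tag_words word 0)
        else wd) wd) wd0
  PySem.Dict.items wd

-- ===== PORT B =====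
def found_duplication_alt (data_dict : List (String × List (String × Int))) (weight_dict : List (String × Int)) (words_list : List String) : List (String × Int) :=
  -- counts = {w: words_list.count(w) for w in dict.fromkeys(words_list)}
  let counts : List (String × Int) :=
    (PySem.Set.ofList words_list).map (fun w => (w, (words_list.count w : Int)))
  let dd : PySem.Dict String (PySem.Dict String Int) :=
    PySem.Dict.ofList (data_dict.map (fun p => (p.1, PySem.Dict.ofList p.2)))
  (PySem.Dict.items (PySem.Dict.ofList weight_dict)).map (fun ew =>
    match PySem.Dict.get? dd ew.1 with
    | none => (ew.1, ew.2)   -- Python raises TypeError ('in' on None) here when counts ≠ {}; excluded by Pre_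
    | some tag_words =>
      (ew.1, ew.2 + counts.foldl (fun bonus wc =>
        if PySem.Dict.contains tag_words wc.1 then bonus + wc.2 * PySem.Dict.getD tag_words wc.1 0
        else bonus) 0))

-- ===== PRECONDITION & SPEC =====
-- Pre_ excludes exactly the inputs on which A raises AttributeError: a weight_dict key absent from data_dict.
def Pre_found_duplication (data_dict : List (String × List (String × Int))) (weight_dict : List (String × Int)) (words_list : List String) : Prop :=
  ∀ p ∈ weight_dict, p.1 ∈ data_dict.map Prod.fst
instance (data_dict : List (String × List (String × Int))) (weight_dict : List (String × Int)) (words_list : List String) : Decidable (Pre_found_duplication data_dict weight_dict words_list) := by unfold Pre_found_duplication; infer_instance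
def pvWitness_found_duplication : (List (String × List (String × Int))) × (List (String × Int)) × List String :=
  ([("e", [("w", 3)]), ("f", [])], [("e", 2), ("f", 1)], ["w", "w", "x"])

def Spec_found_duplication (data_dict : List (String × List (String × Int))) (weight_dict : List (String × Int)) (words_list : List String) (out : List (String × Int)) : Prop := out = found_duplication_alt data_dict weight_dict words_list
instance (data_dict : List (String × List (String × Int))) (weight_dict : List (String × Int)) (words_list : List String) (out : List (String × Int)) : Decidable (Spec_found_duplication data_dict weight_dict words_list out) := by unfold Spec_found_duplication; infer_instance

-- ===== CLAIM (what is proved, stated in full; the proofs are below) =====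
def Claim_equal_found_duplication : Prop := ∀ (data_dict : List (String × List (String × Int))) (weight_dict : List (String × Int)) (words_list : List String), Dom_found_duplication data_dict weight_dict words_list → Pre_found_duplication data_dict weight_dict words_list → Spec_found_duplication data_dict weight_dict words_list (found_duplication data_dict weight_dict words_list)

-- ===== LEMMAS AND PROOFS =====

-- total matched weight a key `e` earns, as seen through A's lookups
def pvS (dd : PySem.Dict String (PySem.Dict String Int)) (ws : List String) (e : String) : Int :=
  match PySem.Dict.get? dd e with
  | none => 0
  | some tw => (ws.map (fun w => if (PySem.Dict.keys tw).contains w then PySem.Dict.getD tw w 0 else 0)).sum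

-- Re-inserting the value a key already holds is a no-op.
theorem insert_self_eq {d : PySem.Dict String Int} {k : String} {v : Int}
    (hnd : (PySem.Dict.keys d).Nodup) (hv : PySem.Dict.get? d k = some v) :
    PySem.Dict.insert d k v = d := by
  apply PySem.Dict.ext
  rw [PySem.Dict.items_insert_of_contains _ _ (by
    rw [PySem.Dict.contains_eq_isSome_get?, hv]; rfl)]
  calc (PySem.Dict.items d).map (fun p => if p.1 == k then (k, v) else p)
      = (PySem.Dict.items d).map id := by
        apply List.map_congr_left
        intro p hp
        by_cases h : p.1 = k
        · obtain ⟨a, b⟩ := p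
          simp only at h
          subst h
          have hg := PySem.Dict.get?_of_mem_items d hp hnd
          rw [hv] at hg
          injection hg with h2
          simp [h2]
        · simp [h]
    _ = PySem.Dict.items d := List.map_id _

theorem sum_ite_single (l : List String) (w : String) (g : String → Int)
    (hnd : l.Nodup) (hw : w ∈ l) :
    (l.map (fun k => if k = w then g k else 0)).sum = g w := by
  induction l with
  | nil => cases hw
  | cons x xs ih =>
    by_cases hx : x = w
    · subst hx
      have hz : (List.map (fun k => if k = x then g k else 0) xs).sum = 0 := by
        apply List.sum_eq_zero
        intro y hy
        obtain ⟨k, hk, rfl⟩ := List.mem_map.mp hy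
        have : k ≠ x := fun e => (List.nodup_cons.mp hnd).1 (e ▸ hk)
        simp [this]
      simp [hz]
    · have hw' : w ∈ xs := by
        rcases List.mem_cons.mp hw with h | h
        · exact absurd h.symm hx
        · exact h
      simp [hx, ih (List.nodup_cons.mp hnd).2 hw']

theorem sum_count_mul (ws : List String) (f : String → Int) :
    ∀ (l : List String), l.Nodup → (∀ w ∈ ws, w ∈ l) →
    (l.map (fun k => (ws.count k : Int) * f k)).sum = (ws.map f).sum := by
  induction ws with
  | nil => intro l _ _; simp
  | cons w ws ih =>
    intro l hnd hmem
    have h1 : ∀ k ∈ l, ((List.count k (w :: ws) : Int) * f k)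
        = (List.count k ws : Int) * f k + (if k = w then f k else 0) := by
      intro k _
      rcases eq_or_ne k w with hk | hk
      · subst hk
        rw [List.count_cons]
        simp only [beq_self_eq_true, if_true]
        push_cast
        ring
      · have hb : (w == k) = false := by simpa using hk.symm
        rw [List.count_cons]
        simp [hb, hk]
    rw [List.map_congr_left h1, PySem.List.sum_map_add_int,
        ih l hnd (fun x hx => hmem x (List.mem_cons_of_mem _ hx)),
        sum_ite_single l w f hnd (hmem w (List.mem_cons_self))]
    simp [add_comm]

-- keys-list membership test = dict membership test
theorem keys_contains_eq (tw : PySem.Dict String Int) (w : String) :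
    (PySem.Dict.keys tw).contains w = PySem.Dict.contains tw w := by
  simp [PySem.Dict.contains_eq_decide_mem_keys]

-- Characterisation of A's inner word loop: it adds the total matched weight to entry `element`.
theorem innerA_eq (tw : PySem.Dict String Int) (element : String) :
    ∀ (ws : List String) (wd : PySem.Dict String Int),
    (PySem.Dict.keys wd).Nodup → PySem.Dict.contains wd element = true →
    ws.foldl (fun wd word =>
        if (PySem.Dict.keys tw).contains word then
          PySem.Dict.insert wd element (PySem.Dict.getD wd element 0 + PySem.Dict.getD tw word 0)
        else wd) wd
    = PySem.Dict.insert wd element (PySem.Dict.getD wd element 0 +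
        (ws.map (fun w => if (PySem.Dict.keys tw).contains w then PySem.Dict.getD tw w 0 else 0)).sum) := by
  intro ws
  induction ws with
  | nil =>
    intro wd hnd hc
    have hc' : (PySem.Dict.get? wd element).isSome = true := by
      rw [← PySem.Dict.contains_eq_isSome_get?]; exact hc
    obtain ⟨v, hv⟩ := Option.isSome_iff_exists.mp hc'
    simp only [List.foldl_nil, List.map_nil, List.sum_nil, add_zero]
    rw [PySem.Dict.getD_eq_get?_getD, hv]
    exact (insert_self_eq hnd hv).symm
  | cons w ws ih =>
    intro wd hnd hc
    by_cases hw : (PySem.Dict.keys tw).contains w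
    · simp only [List.foldl_cons, hw, if_true, List.map_cons, List.sum_cons]
      rw [ih _ (PySem.Dict.nodup_keys_insert _ _ _ hnd)
            (by rw [PySem.Dict.contains_insert]; simp),
          PySem.Dict.getD_insert_self, PySem.Dict.insert_insert_self, add_assoc]
    · simp only [List.foldl_cons, hw, if_false, List.map_cons, List.sum_cons,
        Bool.false_eq_true]
      rw [ih _ hnd hc]
      simp

-- A's outer loop, as an item-wise transformation of its starting state.
theorem outerA_items (dd : PySem.Dict String (PySem.Dict String Int)) (words_list : List String) :
    ∀ (ks : List String) (wd : PySem.Dict String Int),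
    (PySem.Dict.keys wd).Nodup → ks.Nodup → (∀ k ∈ ks, PySem.Dict.contains wd k = true) →
    PySem.Dict.items (ks.foldl (fun wd element =>
      match PySem.Dict.get? dd element with
      | none => wd
      | some tag_words =>
        words_list.foldl (fun wd word =>
          if (PySem.Dict.keys tag_words).contains word then
            PySem.Dict.insert wd element (PySem.Dict.getD wd element 0 + PySem.Dict.getD tag_words word 0)
          else wd) wd) wd)
    = (PySem.Dict.items wd).map (fun p => if ks.contains p.1 then (p.1, p.2 + pvS dd words_list p.1) else p) := by
  intro ks
  induction ks with
  | nil =>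
    intro wd _ _ _
    simp
  | cons e ks ih =>
    intro wd hnd hks hcs
    have hnotin : e ∉ ks := (List.nodup_cons.mp hks).1
    rcases hdd : PySem.Dict.get? dd e with _ | tw
    · simp only [List.foldl_cons, hdd]
      rw [ih wd hnd (List.nodup_cons.mp hks).2 (fun k hk => hcs k (List.mem_cons_of_mem _ hk))]
      apply List.map_congr_left
      intro p _
      by_cases hpe : p.1 = e
      · have hs : pvS dd words_list p.1 = 0 := by
          simp [pvS, hpe, hdd]
        rw [hpe] at hs
        simp [List.contains_eq_mem, hnotin, hpe, hs, Prod.ext_iff]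
      · have : ((e :: ks).contains p.1) = (ks.contains p.1) := by
          simp [List.contains_eq_mem, hpe]
        rw [this]
    · simp only [List.foldl_cons, hdd]
      rw [innerA_eq tw e words_list wd hnd (hcs e List.mem_cons_self),
          ih _ (PySem.Dict.nodup_keys_insert _ _ _ hnd)
            (List.nodup_cons.mp hks).2
            (fun k hk => by
              rw [PySem.Dict.contains_insert]
              simp [hcs k (List.mem_cons_of_mem _ hk)]),
          PySem.Dict.items_insert_of_contains _ _ (hcs e List.mem_cons_self),
          List.map_map]
      apply List.map_congr_left
      intro p hp
      simp only [Function.comp]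
      by_cases hpe : p.1 = e
      · have hget := PySem.Dict.get?_of_mem_items wd hp hnd
        have hgd : PySem.Dict.getD wd e 0 = p.2 := by
          rw [PySem.Dict.getD_eq_get?_getD, ← hpe, hget]; rfl
        have hs : pvS dd words_list e = (words_list.map (fun w => if (PySem.Dict.keys tw).contains w then PySem.Dict.getD tw w 0 else 0)).sum := by
          simp [pvS, hdd]
        simp [List.contains_eq_mem, hnotin, hpe, hgd, hs]
      · have hbe : (p.1 == e) = false := by simpa using hpe
        have : ((e :: ks).contains p.1) = (ks.contains p.1) := by
          simp [List.contains_eq_mem, hpe]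
        simp only [hbe, if_false, Bool.false_eq_true, this]

-- a conditional accumulating foldl is a sum
theorem foldl_if_add (q : String × Int → Bool) (g : String × Int → Int) :
    ∀ (l : List (String × Int)) (b : Int),
    l.foldl (fun b x => if q x then b + g x else b) b
    = b + (l.map (fun x => if q x then g x else 0)).sum := by
  intro l
  induction l with
  | nil => intro b; simp
  | cons x xs ih =>
    intro b
    by_cases h : q x <;> simp [h, ih, add_assoc]

-- B's per-key bonus over the frequency table equals A's sum over all occurrences.
theorem bonus_eq (ws : List String) (tw : PySem.Dict String Int) :
    ((PySem.Set.ofList ws).map (fun w => (w, (ws.count w : Int)))).foldl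
      (fun bonus wc =>
        if PySem.Dict.contains tw wc.1 then bonus + wc.2 * PySem.Dict.getD tw wc.1 0
        else bonus) 0
    = (ws.map (fun w => if (PySem.Dict.keys tw).contains w then PySem.Dict.getD tw w 0 else 0)).sum := by
  rw [foldl_if_add, zero_add, List.map_map]
  have h1 : ((PySem.Set.ofList ws).map
      ((fun x => if PySem.Dict.contains tw x.1 then x.2 * PySem.Dict.getD tw x.1 0 else 0) ∘
        (fun w => (w, (ws.count w : Int))))).sum
      = ((PySem.Set.ofList ws).map
        (fun k => (List.count k ws : Int) *
          (if (PySem.Dict.keys tw).contains k then PySem.Dict.getD tw k 0 else 0))).sum := by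
    apply congrArg
    apply List.map_congr_left
    intro k _
    simp only [Function.comp, keys_contains_eq]
    by_cases h : PySem.Dict.contains tw k <;> simp [h]
  rw [h1]
  exact sum_count_mul ws
    (fun w => if (PySem.Dict.keys tw).contains w then PySem.Dict.getD tw w 0 else 0)
    (PySem.Set.ofList ws) (PySem.Set.nodup_ofList ws)
    (fun w hw => (PySem.Set.mem_ofList ws w).mpr hw)

-- ===== VERDICT (by name: the statement is the Claim_ definition above) =====
theorem found_duplication_spec : Claim_equal_found_duplication := by
  intro data_dict weight_dict words_list _ _
  unfold Spec_found_duplication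
  simp only [found_duplication, found_duplication_alt]
  rw [outerA_items _ words_list _ _ (PySem.Dict.nodup_keys_ofList weight_dict)
        (PySem.Dict.nodup_keys_ofList weight_dict)
        (fun k hk => (PySem.Dict.contains_iff_mem_keys _ k).mpr hk)]
  apply List.map_congr_left
  intro p hp
  have hpk : (PySem.Dict.keys (PySem.Dict.ofList weight_dict)).contains p.1 = true := by
    simp only [List.contains_eq_mem, decide_eq_true_eq, PySem.Dict.keys]
    exact List.mem_map_of_mem hp
  rw [if_pos hpk]
  rcases hdd : PySem.Dict.get? (PySem.Dict.ofList (data_dict.map (fun p => (p.1, PySem.Dict.ofList p.2)))) p.1 with _ | tw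
  · simp [pvS, hdd]
  · simp only [pvS, hdd]
    rw [bonus_eq]
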